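-- pv_equiv track=rewrite | github.com/VannaNotGianna/Tetris-Project | tetris.py | crear_rejilla
-- ===== SOURCE A (Python) =====
-- def crear_rejilla(cerrar_posiciones={}):
--     rejilla = [[(0, 0, 0) for x in range(10)] for x in range(20)]
--
--     for i in range(len(rejilla)):
--         for j in range(len(rejilla[i])):
--             if (j, i) in cerrar_posiciones:
--                 c = cerrar_posiciones[(j, i)]
--                 rejilla[i][j] = c
--     return rejilla
-- ===== SOURCE B (Python) =====
-- def crear_rejilla(cerrar_posiciones={}):
--     rejilla = [[(0, 0, 0)] * 10 for _ in range(20)]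
--     for pos, c in cerrar_posiciones.items():
--         if len(pos) == 2 and 0 <= pos[0] < 10 and 0 <= pos[1] < 20:
--             rejilla[pos[1]][pos[0]] = c
--     return rejilla
-- ===== Notes on version B (the rewrite author's own statement) =====
-- stated objective: simpler
-- what changed: Instead of scanning all 200 grid cells and testing each coordinate pair for dict membership, B allocates the 20x10 grid once and makes a single pass over the dict's items, writing each in-bounds locked cell directly.
import Mathlib
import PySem

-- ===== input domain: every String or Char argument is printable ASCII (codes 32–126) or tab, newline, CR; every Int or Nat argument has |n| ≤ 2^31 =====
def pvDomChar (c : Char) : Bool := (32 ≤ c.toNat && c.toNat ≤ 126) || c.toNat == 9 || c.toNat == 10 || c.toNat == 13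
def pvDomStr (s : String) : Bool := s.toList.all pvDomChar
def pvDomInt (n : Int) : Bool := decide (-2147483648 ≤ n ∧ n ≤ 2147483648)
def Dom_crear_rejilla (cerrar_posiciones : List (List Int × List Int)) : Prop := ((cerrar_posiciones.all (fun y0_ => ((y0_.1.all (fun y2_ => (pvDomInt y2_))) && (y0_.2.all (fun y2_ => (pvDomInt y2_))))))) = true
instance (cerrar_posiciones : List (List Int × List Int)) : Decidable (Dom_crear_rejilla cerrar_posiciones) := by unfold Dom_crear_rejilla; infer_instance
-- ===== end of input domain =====

-- B replaces A's full-grid scan with 200 dict probes by a single pass over the dict's items (simpler decomposition, same result).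


-- shared indexing helper: Python's `xs[i] = v` for an index that is provably in range at every
-- use site in both ports (out of range Python would raise IndexError; that branch is unreachable here)
def pySetIdx {α : Type} (xs : List α) (i : Int) (v : α) : List α :=
  if 0 ≤ i ∧ i < xs.length then xs.set i.toNat v else xs

-- Python's `g[i][j] = c`: fetch row i, set column j, store the row back
def pyWrite2 (g : List (List (List Int))) (i j : Int) (c : List Int) : List (List (List Int)) :=
  pySetIdx g i (pySetIdx ((PySem.List.pyGet? g i).getD []) j c)

-- ===== PORT A =====
-- inner body: `if (j, i) in cerrar_posiciones: c = cerrar_posiciones[(j, i)]; rejilla[i][j] = c`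
def stepA (d : List (List Int × List Int)) (i : Int)
    (g : List (List (List Int))) (j : Int) : List (List (List Int)) :=
  match (PySem.Dict.mk d).get? [j, i] with
  | some c => pyWrite2 g i j c
  | none => g

def crear_rejilla (cerrar_posiciones : List (List Int × List Int)) : List (List (List Int)) :=
  let rejilla := (PySem.List.pyRange 0 20 1).map (fun _ => (PySem.List.pyRange 0 10 1).map (fun _ => ([0, 0, 0] : List Int)))
  (PySem.List.pyRange 0 (rejilla.length : Int) 1).foldl
    (fun g i =>
      (PySem.List.pyRange 0 ((((PySem.List.pyGet? g i).getD []).length : Int)) 1).foldl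
        (stepA cerrar_posiciones i) g)
    rejilla

-- ===== PORT B =====
-- loop body: `if len(pos) == 2 and 0 <= pos[0] < 10 and 0 <= pos[1] < 20: rejilla[pos[1]][pos[0]] = c`
def stepB (g : List (List (List Int))) (pc : List Int × List Int) : List (List (List Int)) :=
  match pc.1 with
  | [j, i] => if 0 ≤ j ∧ j < 10 ∧ 0 ≤ i ∧ i < 20 then pyWrite2 g i j pc.2 else g
  | _ => g

def crear_rejilla_alt (cerrar_posiciones : List (List Int × List Int)) : List (List (List Int)) :=
  let rejilla := (List.range 20).map (fun _ => List.replicate 10 ([0, 0, 0] : List Int))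
  cerrar_posiciones.foldl stepB rejilla

-- ===== PRECONDITION & SPEC =====
-- The association list stands for a Python dict, whose keys are necessarily distinct; Pre_ excludes
-- only duplicate-key lists, which no Python dict realizes (there A reads the first binding, B the last).
def Pre_crear_rejilla (cerrar_posiciones : List (List Int × List Int)) : Prop :=
  (cerrar_posiciones.map Prod.fst).Nodup
instance (cerrar_posiciones : List (List Int × List Int)) : Decidable (Pre_crear_rejilla cerrar_posiciones) := by unfold Pre_crear_rejilla; infer_instance

def pvWitness_crear_rejilla : (List (List Int × List Int)) := [([2, 3], [255, 0, 0]), ([0, 19], [0, 255, 0])]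

def Spec_crear_rejilla (cerrar_posiciones : List (List Int × List Int)) (out : List (List (List Int))) : Prop := out = crear_rejilla_alt cerrar_posiciones
instance (cerrar_posiciones : List (List Int × List Int)) (out : List (List (List Int))) : Decidable (Spec_crear_rejilla cerrar_posiciones out) := by unfold Spec_crear_rejilla; infer_instance

-- ===== CLAIM (what is proved, stated in full; the proofs are below) =====
def Claim_equal_crear_rejilla : Prop := ∀ (cerrar_posiciones : List (List Int × List Int)), Dom_crear_rejilla cerrar_posiciones → Pre_crear_rejilla cerrar_posiciones → Spec_crear_rejilla cerrar_posiciones (crear_rejilla cerrar_posiciones)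

-- ===== LEMMAS AND PROOFS =====

-- the 20×10 shape both programs maintain
def Shape (g : List (List (List Int))) : Prop := g.length = 20 ∧ ∀ r ∈ g, r.length = 10

-- cell (i, j) of the grid
def getCell (g : List (List (List Int))) (i j : Nat) : List Int := ((g[i]?.getD [])[j]?).getD []

-- the common value both programs compute at each cell
def cellOf (d : List (List Int × List Int)) (i j : Nat) : List Int :=
  ((PySem.Dict.mk d).get? [(j : Int), (i : Int)]).getD [0, 0, 0]

lemma shape_pyWrite2 {g : List (List (List Int))} (hs : Shape g) (i j : Int) (c : List Int) :
    Shape (pyWrite2 g i j c) := by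
  obtain ⟨h20, h10⟩ := hs
  unfold pyWrite2 pySetIdx
  by_cases hi : 0 ≤ i ∧ i < (g.length : Int)
  · rw [if_pos hi]
    have hlt : i.toNat < g.length := by omega
    have hrow : PySem.List.pyGet? g i = some g[i.toNat] := by
      rw [PySem.List.pyGet?_of_nonneg g hi.1, List.getElem?_eq_getElem hlt]
    refine ⟨by simpa using h20, ?_⟩
    intro r hr
    rcases List.mem_or_eq_of_mem_set hr with hr' | hr'
    · exact h10 _ hr'
    · subst hr'
      rw [hrow]
      simp only [Option.getD_some]
      split
      · rw [List.length_set]; exact h10 _ (List.getElem_mem hlt)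
      · exact h10 _ (List.getElem_mem hlt)
  · rw [if_neg hi]; exact ⟨h20, h10⟩

lemma getElem?_pySetIdx {α : Type} (xs : List α) (i : Int) (v : α) (k : Nat)
    (h0 : 0 ≤ i) (hl : i < xs.length) :
    (pySetIdx xs i v)[k]? = if k = i.toNat then some v else xs[k]? := by
  unfold pySetIdx
  rw [if_pos ⟨h0, hl⟩]
  rcases eq_or_ne k i.toNat with h | h
  · subst h
    rw [if_pos rfl, List.getElem?_set_self (by omega)]
  · rw [if_neg h, List.getElem?_set_ne (by omega)]

lemma getCell_pyWrite2 {g : List (List (List Int))} (hs : Shape g) {i j : Int}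
    (hi : 0 ≤ i ∧ i < 20) (hj : 0 ≤ j ∧ j < 10) (c : List Int) (i' j' : Nat) :
    getCell (pyWrite2 g i j c) i' j' =
      if i' = i.toNat ∧ j' = j.toNat then c else getCell g i' j' := by
  obtain ⟨h20, h10⟩ := hs
  have hig : i < (g.length : Int) := by omega
  have hlt : i.toNat < g.length := by omega
  have hrow : PySem.List.pyGet? g i = some g[i.toNat] := by
    rw [PySem.List.pyGet?_of_nonneg g hi.1, List.getElem?_eq_getElem hlt]
  have hrlen : g[i.toNat].length = 10 := h10 _ (List.getElem_mem hlt)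
  unfold getCell pyWrite2
  rw [getElem?_pySetIdx _ _ _ _ hi.1 (by omega)]
  by_cases hii : i' = i.toNat
  · subst hii
    simp only [if_true, true_and, hrow, Option.getD_some]
    rw [getElem?_pySetIdx _ _ _ _ hj.1 (by rw [hrlen]; omega)]
    by_cases hjj : j' = j.toNat
    · subst hjj
      simp
    · simp [hjj, List.getElem?_eq_getElem hlt]
  · rw [if_neg hii, if_neg (show ¬(i' = i.toNat ∧ j' = j.toNat) from fun h => hii h.1)]

lemma getD_getD {α : Type} (o : Option α) (v : α) : o.getD (o.getD v) = o.getD v := by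
  cases o <;> rfl

lemma shape_stepA (d : List (List Int × List Int)) (i : Int) (g : List (List (List Int)))
    (j : Int) (hg : Shape g) : Shape (stepA d i g j) := by
  unfold stepA
  split
  · exact shape_pyWrite2 hg _ _ _
  · exact hg

lemma shape_stepB (g : List (List (List Int))) (pc : List Int × List Int) (hg : Shape g) :
    Shape (stepB g pc) := by
  unfold stepB
  rcases pc with ⟨k, c⟩
  rcases k with _ | ⟨a, _ | ⟨b, _ | ⟨e, t⟩⟩⟩ <;> simp only
  · exact hg
  · exact hg
  · split
    · exact shape_pyWrite2 hg _ _ _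
    · exact hg
  · exact hg

lemma shape_foldl {β : Type} (f : List (List (List Int)) → β → List (List (List Int)))
    (hf : ∀ g b, Shape g → Shape (f g b)) :
    ∀ (l : List β) (g : List (List (List Int))), Shape g → Shape (l.foldl f g) := by
  intro l
  induction l with
  | nil => intro g hg; exact hg
  | cons x t ih => intro g hg; exact ih _ (hf g x hg)

-- the inner `for j in range(...)` loop of A, over an arbitrary list of in-bounds column indices
lemma A_inner (d : List (List Int × List Int)) (i : Int) (hi : 0 ≤ i ∧ i < 20) :
    ∀ (M : List Int), (∀ x ∈ M, 0 ≤ x ∧ x < 10) →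
    ∀ g, Shape g → ∀ (i' j' : Nat), i' < 20 → j' < 10 →
    getCell (M.foldl (stepA d i) g) i' j' =
      if i' = i.toNat ∧ (j' : Int) ∈ M then
        ((PySem.Dict.mk d).get? [(j' : Int), i]).getD (getCell g i' j')
      else getCell g i' j' := by
  intro M
  induction M with
  | nil => intro _ g hg i' j' _ _; simp
  | cons x t ih =>
    intro hM g hg i' j' hi' hj'
    have hx := hM x (List.mem_cons_self)
    have ht : ∀ y ∈ t, 0 ≤ y ∧ y < 10 := fun y hy => hM y (List.mem_cons_of_mem _ hy)
    have hg' : Shape (stepA d i g x) := shape_stepA d i g x hg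
    rw [List.foldl_cons, ih ht _ hg' i' j' hi' hj']
    by_cases hcell : i' = i.toNat ∧ (j' : Int) = x
    · -- the head index x writes exactly cell (i', j')
      have hgx : getCell (stepA d i g x) i' j' =
          ((PySem.Dict.mk d).get? [(j' : Int), i]).getD (getCell g i' j') := by
        unfold stepA
        rcases hcase : (PySem.Dict.mk d).get? [x, i] with _ | c
        · rw [← hcell.2] at hcase
          simp [hcase]
        · rw [getCell_pyWrite2 hg hi hx c i' j',
            if_pos ⟨hcell.1, by omega⟩, ← hcell.2] at *
          simp [hcase]
      rw [hgx]
      by_cases hmem : (j' : Int) ∈ t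
      · rw [if_pos ⟨hcell.1, hmem⟩, if_pos ⟨hcell.1, List.mem_cons_of_mem _ hmem⟩, getD_getD]
      · rw [if_neg (fun h => hmem h.2), if_pos ⟨hcell.1, hcell.2 ▸ List.mem_cons_self⟩]
    · -- the head index x writes some other cell (or none): cell (i', j') is untouched
      have hgx : getCell (stepA d i g x) i' j' = getCell g i' j' := by
        unfold stepA
        rcases hcase : (PySem.Dict.mk d).get? [x, i] with _ | c
        · rfl
        · rw [getCell_pyWrite2 hg hi hx c i' j', if_neg (fun h => hcell ⟨h.1, by omega⟩)]
      rw [hgx]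
      by_cases hii : i' = i.toNat
      · have hne : (j' : Int) ≠ x := fun h => hcell ⟨hii, h⟩
        simp only [List.mem_cons, hne, false_or]
      · simp [hii]

-- one iteration of A's outer `for i in range(len(rejilla))` loop
lemma A_outer_step (d : List (List Int × List Int)) (x : Int) (hx : 0 ≤ x ∧ x < 20)
    (g : List (List (List Int))) (hg : Shape g) (i' j' : Nat) (hi' : i' < 20) (hj' : j' < 10) :
    getCell ((PySem.List.pyRange 0 ((((PySem.List.pyGet? g x).getD []).length : Int)) 1).foldl
        (stepA d x) g) i' j' =
      if i' = x.toNat then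
        ((PySem.Dict.mk d).get? [(j' : Int), x]).getD (getCell g i' j')
      else getCell g i' j' := by
  obtain ⟨h20, h10⟩ := hg
  have hlt : x.toNat < g.length := by omega
  have hrow : PySem.List.pyGet? g x = some g[x.toNat] := by
    rw [PySem.List.pyGet?_of_nonneg g hx.1, List.getElem?_eq_getElem hlt]
  have hrlen : g[x.toNat].length = 10 := h10 _ (List.getElem_mem hlt)
  rw [hrow]
  simp only [Option.getD_some, hrlen]
  rw [A_inner d x hx _ (fun y hy => by
        rw [PySem.List.mem_pyRange_one] at hy; omega)
      g ⟨h20, h10⟩ i' j' hi' hj']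
  have hmem : (j' : Int) ∈ PySem.List.pyRange 0 ((10 : Nat) : Int) 1 := by
    rw [PySem.List.mem_pyRange_one]; omega
  by_cases hii : i' = x.toNat
  · rw [if_pos ⟨hii, hmem⟩, if_pos hii]
  · rw [if_neg (fun h => hii h.1), if_neg hii]

-- A's outer loop over an arbitrary list of in-bounds row indices
lemma A_outer (d : List (List Int × List Int)) :
    ∀ (L : List Int), (∀ x ∈ L, 0 ≤ x ∧ x < 20) →
    ∀ g, Shape g → ∀ (i' j' : Nat), i' < 20 → j' < 10 →
    getCell (L.foldl (fun g i =>
        (PySem.List.pyRange 0 ((((PySem.List.pyGet? g i).getD []).length : Int)) 1).foldl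
          (stepA d i) g) g) i' j' =
      if (i' : Int) ∈ L then
        ((PySem.Dict.mk d).get? [(j' : Int), (i' : Int)]).getD (getCell g i' j')
      else getCell g i' j' := by
  intro L
  induction L with
  | nil => intro _ g hg i' j' _ _; simp
  | cons x t ih =>
    intro hL g hg i' j' hi' hj'
    have hx := hL x (List.mem_cons_self)
    have ht : ∀ y ∈ t, 0 ≤ y ∧ y < 20 := fun y hy => hL y (List.mem_cons_of_mem _ hy)
    have hg' := shape_foldl (stepA d x) (shape_stepA d x)
      (PySem.List.pyRange 0 ((((PySem.List.pyGet? g x).getD []).length : Int)) 1) g hg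
    rw [List.foldl_cons, ih ht _ hg' i' j' hi' hj', A_outer_step d x hx g hg i' j' hi' hj']
    by_cases hii : (i' : Int) = x
    · have hii' : i' = x.toNat := by omega
      rw [if_pos hii']
      by_cases hmem : (i' : Int) ∈ t
      · rw [if_pos hmem, if_pos (List.mem_cons_of_mem _ hmem), ← hii, getD_getD]
      · rw [if_neg hmem, if_pos (hii ▸ List.mem_cons_self), ← hii]
    · have hii' : i' ≠ x.toNat := by omega
      rw [if_neg hii']
      simp only [List.mem_cons, hii, false_or]

-- B's single pass over the items: with distinct keys the final cell is the (unique) binding's value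
lemma B_fold :
    ∀ (d : List (List Int × List Int)), (d.map Prod.fst).Nodup →
    ∀ g, Shape g → ∀ (i' j' : Nat), i' < 20 → j' < 10 →
    getCell (d.foldl stepB g) i' j' =
      ((PySem.Dict.mk d).get? [(j' : Int), (i' : Int)]).getD (getCell g i' j') := by
  intro d
  induction d with
  | nil => intro _ g hg i' j' _ _; simp [PySem.Dict.get?]
  | cons kc t ih =>
    intro hnd g hg i' j' hi' hj'
    rcases kc with ⟨k, c⟩
    have hnd' : (t.map Prod.fst).Nodup := (List.nodup_cons.mp hnd).2
    have hknot : k ∉ t.map Prod.fst := (List.nodup_cons.mp hnd).1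
    rw [List.foldl_cons, ih hnd' _ (shape_stepB g (k, c) hg) i' j' hi' hj',
      PySem.Dict.get?_mk_cons]
    by_cases hk : k = [(j' : Int), (i' : Int)]
    · subst hk
      have hnone : (PySem.Dict.mk t).get? [(j' : Int), (i' : Int)] = none := by
        rw [PySem.Dict.get?_eq_none_iff_not_mem_keys]
        simpa using hknot
      have hcell : getCell (stepB g ([(j' : Int), (i' : Int)], c)) i' j' = c := by
        unfold stepB
        simp only
        rw [if_pos ⟨by omega, by omega, by omega, by omega⟩,
          getCell_pyWrite2 hg ⟨by omega, by omega⟩ ⟨by omega, by omega⟩ c i' j',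
          if_pos ⟨by omega, by omega⟩]
      rw [hnone, hcell]
      simp
    · have hbeq : (k == [(j' : Int), (i' : Int)]) = false := by
        simp [hk]
      rw [hbeq]
      simp only [Bool.false_eq_true, if_false]
      have hcell : getCell (stepB g (k, c)) i' j' = getCell g i' j' := by
        unfold stepB
        rcases k with _ | ⟨a, _ | ⟨b, _ | ⟨e, t3⟩⟩⟩
        · rfl
        · rfl
        · show getCell (if 0 ≤ a ∧ a < 10 ∧ 0 ≤ b ∧ b < 20 then pyWrite2 g b a c else g) i' j' =
            getCell g i' j'
          split_ifs with hb
          · rw [getCell_pyWrite2 hg ⟨hb.2.2.1, hb.2.2.2⟩ ⟨hb.1, hb.2.1⟩ c i' j', if_neg]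
            rintro ⟨h1, h2⟩
            exact hk (by subst h1; subst h2; simp; omega)
          · rfl
        · rfl
      rw [hcell]

-- two 20×10 grids with equal cells are equal
lemma grid_ext {g1 g2 : List (List (List Int))} (h1 : Shape g1) (h2 : Shape g2)
    (hc : ∀ i j, i < 20 → j < 10 → getCell g1 i j = getCell g2 i j) : g1 = g2 := by
  obtain ⟨h1l, h1r⟩ := h1
  obtain ⟨h2l, h2r⟩ := h2
  apply List.ext_getElem (by omega)
  intro i hi1 hi2
  have hr1 : g1[i].length = 10 := h1r _ (List.getElem_mem hi1)
  have hr2 : g2[i].length = 10 := h2r _ (List.getElem_mem hi2)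
  apply List.ext_getElem (by omega)
  intro j hj1 hj2
  have := hc i j (by omega) (by omega)
  unfold getCell at this
  rw [List.getElem?_eq_getElem hi1, List.getElem?_eq_getElem hi2] at this
  simp only [Option.getD_some] at this
  rw [List.getElem?_eq_getElem hj1, List.getElem?_eq_getElem hj2] at this
  simpa using this

theorem crear_rejilla_spec : Claim_equal_crear_rejilla := by
  intro d _ hpre
  unfold Spec_crear_rejilla
  have hinitA : ((PySem.List.pyRange 0 20 1).map
      (fun _ => (PySem.List.pyRange 0 10 1).map (fun _ => ([0, 0, 0] : List Int)))) =
      List.replicate 20 (List.replicate 10 ([0, 0, 0] : List Int)) := by decide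
  have hinitB : ((List.range 20).map (fun _ => List.replicate 10 ([0, 0, 0] : List Int))) =
      List.replicate 20 (List.replicate 10 ([0, 0, 0] : List Int)) := by decide
  have hShape0 : Shape (List.replicate 20 (List.replicate 10 ([0, 0, 0] : List Int))) := by
    constructor
    · simp
    · intro r hr
      rw [List.eq_of_mem_replicate hr]
      simp
  have hcell0 : ∀ (i' j' : Nat), i' < 20 → j' < 10 →
      getCell (List.replicate 20 (List.replicate 10 ([0, 0, 0] : List Int))) i' j' = [0, 0, 0] := by
    intro i' j' hi' hj'
    unfold getCell
    rw [List.getElem?_replicate_of_lt hi']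
    simp only [Option.getD_some]
    rw [List.getElem?_replicate_of_lt hj']
    rfl
  unfold crear_rejilla crear_rejilla_alt
  simp only [hinitA, hinitB]
  have hlen : ((List.replicate 20 (List.replicate 10 ([0, 0, 0] : List Int))).length : Int) = 20 := by
    simp
  rw [hlen]
  apply grid_ext
  · exact shape_foldl _ (fun g i hg =>
      shape_foldl (stepA d i) (shape_stepA d i) _ g hg) _ _ hShape0
  · exact shape_foldl stepB shape_stepB _ _ hShape0
  · intro i' j' hi' hj'
    rw [A_outer d _ (fun x hx => by rw [PySem.List.mem_pyRange_one] at hx; omega)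
        _ hShape0 i' j' hi' hj',
      B_fold d hpre _ hShape0 i' j' hi' hj',
      if_pos (by rw [PySem.List.mem_pyRange_one]; omega)]
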